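-- pv_equiv track=rewrite | github.com/jonasw234/FLOSS-API-Triage | floss-suspicious.py | find_suspicious_combinations
-- ===== SOURCE A (Python) =====
-- def find_suspicious_combinations(floss_output: str, suspicious_apis: dict) -> dict:
--     """
--     Find all suspicious API combinations and return them as a dict.
--
--     Params
--     ------
--     floss_output : str
--         Output generated by FLOSS string extraction
--     suspicious_apis : dict
--         Dictionary of suspicious API call combinations in the form of
--         {"description": [["this", "or", "this"], ["and", "either", "of", "these"]]}
--
--     Returns
--     -------
--     dict
--         A dictionary with all suspicious combinations
--     """
--     suspicious_combinations_found = {}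
--     # Cache single suspicious API for easier comparison if a complete check is needed
--     single_suspicious_apis = set()
--     for suspicious_api_combinations in suspicious_apis.values():
--         for suspicious_api_ors in suspicious_api_combinations:
--             for suspicious_api in suspicious_api_ors:
--                 single_suspicious_apis.add(suspicious_api)
--     # Try to find all calls to suspicious APIs in the FLOSS output
--     suspicious_apis_found = set()
--     for line in floss_output.split('\n'):
--         if line in single_suspicious_apis:
--             suspicious_apis_found.add(line)
--     # Now let's check if enough APIs are found to form the suspicious combinations
--     for description, suspicious_api_combinations in suspicious_apis.items():
--         suspicious_combination = []
--         for ors in suspicious_api_combinations: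
--             for api in ors:
--                 if api in suspicious_apis_found:
--                     suspicious_combination.append(api)
--                     break
--             else:
--                 # Found at least one of the OR clauses
--                 break
--         else:
--             # Found all of the AND clauses, note exact combination
--             suspicious_combinations_found[description] = suspicious_combination
--     return suspicious_combinations_found
-- ===== SOURCE B (Python) =====
-- def find_suspicious_combinations(floss_output: str, suspicious_apis: dict) -> dict:
--     entries = list(suspicious_apis.items())
--     # Inverted index: api string -> postings (entry index, clause index, position in clause)
--     postings = [(api, (i, j, k))
--                 for i, (_, combos) in enumerate(entries)
--                 for j, ors in enumerate(combos)
--                 for k, api in enumerate(ors)]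
--     index = {}
--     for api, t in postings:
--         index[api] = index.get(api, []) + [t]
--     # One scan of the FLOSS lines: per clause remember the hit with the smallest position
--     best = {}
--     for line in floss_output.split('\n'):
--         for (i, j, k) in index.get(line, []):
--             cur = best.get((i, j))
--             if cur is None or k < cur[0]:
--                 best[(i, j)] = (k, line)
--     # Keep every entry whose clauses all have a hit
--     result = {}
--     for i, (description, combos) in enumerate(entries):
--         if all((i, j) in best for j in range(len(combos))):
--             result[description] = [best[(i, j)][1] for j in range(len(combos))]
--     return result
-- ===== Notes on version B (the rewrite author's own statement) =====
-- stated objective: alternative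
-- what changed: B inverts the traversal: instead of A's building a set of all suspicious APIs, filtering the FLOSS lines against it, and then re-scanning every OR-clause for its first API present, B builds an inverted index from each API token to its positions (entry, clause, position), makes a single pass over the FLOSS lines updating per-clause the hit with the smallest position, and finally keeps each entry whose clauses all recorded a hit, emitting the recorded lines.
import Mathlib
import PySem

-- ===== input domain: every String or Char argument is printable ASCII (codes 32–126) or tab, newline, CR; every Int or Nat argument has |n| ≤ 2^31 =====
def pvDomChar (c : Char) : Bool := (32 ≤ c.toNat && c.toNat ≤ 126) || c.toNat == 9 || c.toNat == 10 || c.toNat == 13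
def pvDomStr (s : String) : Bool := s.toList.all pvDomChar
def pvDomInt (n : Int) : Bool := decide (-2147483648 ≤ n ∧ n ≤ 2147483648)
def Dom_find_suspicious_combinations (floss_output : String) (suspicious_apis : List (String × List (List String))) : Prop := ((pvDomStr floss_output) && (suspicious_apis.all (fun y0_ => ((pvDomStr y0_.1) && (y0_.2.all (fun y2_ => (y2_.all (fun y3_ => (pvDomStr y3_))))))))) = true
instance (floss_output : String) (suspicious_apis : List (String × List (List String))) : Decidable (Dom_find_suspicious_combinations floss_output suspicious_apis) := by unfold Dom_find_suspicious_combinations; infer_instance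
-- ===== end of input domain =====

-- ===== PORT A =====
-- B replaces A's set-caching plus per-clause membership scanning by an inverted index over the API
-- tokens and a single scan of the FLOSS lines keeping the smallest-position hit per clause
-- (objective: alternative).
-- helper for A's inner for/else: first api of `ors` found in `found`, else None
def pvFirstFound (found : PySem.Set String) : List String → Option String
  | [] => none
  | api :: rest => if PySem.Set.contains found api then some api else pvFirstFound found rest

-- helper for A's middle for/else: collect one hit per OR-clause, None as soon as a clause has no hit
def pvCombLoop (found : PySem.Set String) : List (List String) → List String → Option (List String)
  | [], acc => some acc
  | ors :: rest, acc =>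
    match pvFirstFound found ors with
    | some api => pvCombLoop found rest (acc ++ [api])
    | none => none

def find_suspicious_combinations (floss_output : String) (suspicious_apis : List (String × List (List String))) : List (String × List String) :=
  let single_suspicious_apis : PySem.Set String :=
    suspicious_apis.foldl (fun s p =>
      p.2.foldl (fun s ors =>
        ors.foldl (fun s api => PySem.Set.add s api) s) s) PySem.Set.empty
  let suspicious_apis_found : PySem.Set String :=
    ((PySem.Str.split? floss_output "\n").getD []).foldl (fun s line =>
      if PySem.Set.contains single_suspicious_apis line then PySem.Set.add s line else s) PySem.Set.empty
  let d : PySem.Dict String (List String) :=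
    suspicious_apis.foldl (fun d p =>
      match pvCombLoop suspicious_apis_found p.2 [] with
      | some comb => d.insert p.1 comb
      | none => d) PySem.Dict.empty
  d.items

-- ===== PORT B =====
-- postings comprehension: (api, (entry index, clause index, position in clause))
def pvPostingsB (sa : List (String × List (List String))) : List (String × Nat × Nat × Nat) :=
  sa.zipIdx.flatMap (fun pi =>
    pi.1.2.zipIdx.flatMap (fun oj =>
      oj.1.zipIdx.map (fun ak => (ak.1, pi.2, oj.2, ak.2))))

-- index[api] = index.get(api, []) + [t]
def pvIndexB (sa : List (String × List (List String))) : PySem.Dict String (List (Nat × Nat × Nat)) :=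
  (pvPostingsB sa).foldl (fun d pt => d.modify pt.1 [] (· ++ [pt.2])) PySem.Dict.empty

-- body of B's inner loop: keep the hit with the smallest clause position
def pvBestStep (line : String) (b : PySem.Dict (Nat × Nat) (Nat × String)) (t : Nat × Nat × Nat) :
    PySem.Dict (Nat × Nat) (Nat × String) :=
  match b.get? (t.1, t.2.1) with
  | none => b.insert (t.1, t.2.1) (t.2.2, line)
  | some cur => if t.2.2 < cur.1 then b.insert (t.1, t.2.1) (t.2.2, line) else b

-- one scan of the FLOSS lines over the inverted index
def pvBestB (floss_output : String) (sa : List (String × List (List String))) :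
    PySem.Dict (Nat × Nat) (Nat × String) :=
  ((PySem.Str.split? floss_output "\n").getD []).foldl
    (fun b line => ((pvIndexB sa).getD line []).foldl (pvBestStep line) b) PySem.Dict.empty

def find_suspicious_combinations_alt (floss_output : String) (suspicious_apis : List (String × List (List String))) : List (String × List String) :=
  let best := pvBestB floss_output suspicious_apis
  let result : PySem.Dict String (List String) :=
    suspicious_apis.zipIdx.foldl (fun d pi =>
      if (List.range pi.1.2.length).all (fun j => best.contains (pi.2, j))
      then d.insert pi.1.1 ((List.range pi.1.2.length).map (fun j => (best.getD (pi.2, j) (0, "")).2))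
      else d) PySem.Dict.empty
  result.items

-- ===== PRECONDITION & SPEC =====
-- Pre_ excludes association lists with duplicate description keys: those cannot arise from a Python
-- dict argument (a dict collapses duplicates), so A's behaviour there is not defined by the source.
def Pre_find_suspicious_combinations (floss_output : String) (suspicious_apis : List (String × List (List String))) : Prop :=
  (suspicious_apis.map Prod.fst).Nodup
instance (floss_output : String) (suspicious_apis : List (String × List (List String))) : Decidable (Pre_find_suspicious_combinations floss_output suspicious_apis) := by unfold Pre_find_suspicious_combinations; infer_instance

def pvWitness_find_suspicious_combinations : String × (List (String × List (List String))) :=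
  ("CreateFileA\nWriteProcessMemory\nother", [("process injection", [["OpenProcess", "CreateFileA"], ["WriteProcessMemory"]]), ("keylogging", [["GetAsyncKeyState"]])])

def Spec_find_suspicious_combinations (floss_output : String) (suspicious_apis : List (String × List (List String))) (out : List (String × List String)) : Prop := out = find_suspicious_combinations_alt floss_output suspicious_apis
instance (floss_output : String) (suspicious_apis : List (String × List (List String))) (out : List (String × List String)) : Decidable (Spec_find_suspicious_combinations floss_output suspicious_apis out) := by unfold Spec_find_suspicious_combinations; infer_instance

-- ===== CLAIM (what is proved, stated in full; the proofs are below) =====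
def Claim_equal_find_suspicious_combinations : Prop := ∀ (floss_output : String) (suspicious_apis : List (String × List (List String))), Dom_find_suspicious_combinations floss_output suspicious_apis → Pre_find_suspicious_combinations floss_output suspicious_apis → Spec_find_suspicious_combinations floss_output suspicious_apis (find_suspicious_combinations floss_output suspicious_apis)

-- ===== LEMMAS AND PROOFS =====
-- proof-only abbreviations
def pvLines (fo : String) : List String := (PySem.Str.split? fo "\n").getD []
def pvHit (fo : String) (api : String) : Bool := (pvLines fo).contains api
def pvS (sa : List (String × List (List String))) : PySem.Set String :=
  sa.foldl (fun s p =>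
    p.2.foldl (fun s ors =>
      ors.foldl (fun s api => PySem.Set.add s api) s) s) PySem.Set.empty
def pvFound (fo : String) (sa : List (String × List (List String))) : PySem.Set String :=
  (pvLines fo).foldl (fun s line =>
    if PySem.Set.contains (pvS sa) line then PySem.Set.add s line else s) PySem.Set.empty

-- the reference per-entry matcher both programs are reduced to
def pvSpecMatch (P : String → Bool) : List (List String) → Option (List String)
  | [] => some []
  | ors :: rest =>
    match ors.find? P with
    | none => none
    | some a => (pvSpecMatch P rest).map (a :: ·)

lemma pv_specMatch_some (P : String → Bool) :
    ∀ combos : List (List String), (∀ ors ∈ combos, (ors.find? P).isSome) →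
      pvSpecMatch P combos = some (combos.map (fun ors => (ors.find? P).getD "")) := by
  intro combos
  induction combos with
  | nil => intro _; rfl
  | cons ors rest ih =>
    intro h
    obtain ⟨a, ha⟩ := Option.isSome_iff_exists.mp (h ors (List.mem_cons_self ..))
    have := ih (fun o ho => h o (List.mem_cons_of_mem _ ho))
    simp [pvSpecMatch, ha, this]

lemma pv_specMatch_none (P : String → Bool) :
    ∀ (combos : List (List String)) (ors : List String), ors ∈ combos → ors.find? P = none →
      pvSpecMatch P combos = none := by
  intro combos
  induction combos with
  | nil => intro ors h _; simp at h
  | cons o rest ih =>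
    intro ors hmem hnone
    rcases List.mem_cons.mp hmem with rfl | htl
    · simp [pvSpecMatch, hnone]
    · cases hfo : o.find? P with
      | none => simp [pvSpecMatch, hfo]
      | some a => simp [pvSpecMatch, hfo, ih ors htl hnone]

-- A side: characterize the cached sets
lemma pv_mem_addFold (ors : List String) (s : PySem.Set String) (x : String) :
    x ∈ ors.foldl (fun s api => PySem.Set.add s api) s ↔ x ∈ s ∨ x ∈ ors := by
  induction ors generalizing s with
  | nil => simp
  | cons a t ih => simp [List.foldl, ih, PySem.Set.mem_add]; tauto

lemma pv_mem_combosFold (combos : List (List String)) (s : PySem.Set String) (x : String) :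
    x ∈ combos.foldl (fun s ors => ors.foldl (fun s api => PySem.Set.add s api) s) s ↔
      x ∈ s ∨ ∃ ors ∈ combos, x ∈ ors := by
  induction combos generalizing s with
  | nil => simp
  | cons o t ih => simp [List.foldl, ih, pv_mem_addFold]; tauto

lemma pv_mem_singleFold (l : List (String × List (List String))) (s : PySem.Set String) (x : String) :
    x ∈ l.foldl (fun s p => p.2.foldl (fun s ors => ors.foldl (fun s api => PySem.Set.add s api) s) s) s ↔
      x ∈ s ∨ ∃ p ∈ l, ∃ ors ∈ p.2, x ∈ ors := by
  induction l generalizing s with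
  | nil => simp
  | cons p t ih =>
    simp [List.foldl, ih, pv_mem_combosFold]
    rw [or_assoc]

lemma pv_mem_foundFold (lines : List String) (S : PySem.Set String) (s : PySem.Set String) (x : String) :
    x ∈ lines.foldl (fun s line => if PySem.Set.contains S line then PySem.Set.add s line else s) s ↔
      x ∈ s ∨ (x ∈ lines ∧ x ∈ S) := by
  induction lines generalizing s with
  | nil => simp
  | cons a t ih =>
    by_cases h : a ∈ S
    · have hc : PySem.Set.contains S a = true := (PySem.Set.contains_iff S a).mpr h
      simp only [List.foldl, hc, if_true, ih, PySem.Set.mem_add, List.mem_cons]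
      constructor
      · rintro ((h1 | rfl) | ⟨h2, h3⟩)
        exacts [Or.inl h1, Or.inr ⟨Or.inl rfl, h⟩, Or.inr ⟨Or.inr h2, h3⟩]
      · rintro (h1 | ⟨(rfl | h2), h3⟩)
        exacts [Or.inl (Or.inl h1), Or.inl (Or.inr rfl), Or.inr ⟨h2, h3⟩]
    · have hc : PySem.Set.contains S a = false := by
        cases hb : PySem.Set.contains S a
        · rfl
        · exact absurd ((PySem.Set.contains_iff S a).mp hb) h
      simp only [List.foldl, hc, if_false, ih, List.mem_cons]
      constructor
      · rintro (h1 | ⟨h2, h3⟩)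
        exacts [Or.inl h1, Or.inr ⟨Or.inr h2, h3⟩]
      · rintro (h1 | ⟨(rfl | h2), h3⟩)
        exacts [Or.inl h1, absurd h3 h, Or.inr ⟨h2, h3⟩]

lemma pv_firstFound_eq (fo : String) (found : PySem.Set String) (ors : List String)
    (h : ∀ api ∈ ors, PySem.Set.contains found api = pvHit fo api) :
    pvFirstFound found ors = ors.find? (pvHit fo) := by
  induction ors with
  | nil => rfl
  | cons a t ih =>
    have ha := h a (List.mem_cons_self ..)
    have iht := ih (fun api hm => h api (List.mem_cons_of_mem _ hm))
    have hdef : pvFirstFound found (a :: t)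
        = if PySem.Set.contains found a = true then some a else pvFirstFound found t := rfl
    cases hc : pvHit fo a
    · rw [hdef, ha, hc, if_neg (by simp), iht,
        List.find?_cons_of_neg (by simp [hc])]
    · rw [hdef, ha, hc, if_pos rfl, List.find?_cons_of_pos hc]

lemma pv_combLoop_eq (fo : String) (found : PySem.Set String) (combos : List (List String)) (acc : List String)
    (h : ∀ ors ∈ combos, ∀ api ∈ ors, PySem.Set.contains found api = pvHit fo api) :
    pvCombLoop found combos acc = (pvSpecMatch (pvHit fo) combos).map (fun l => acc ++ l) := by
  induction combos generalizing acc with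
  | nil => simp [pvCombLoop, pvSpecMatch]
  | cons ors rest ih =>
    have hfind := pv_firstFound_eq fo found ors (h ors (List.mem_cons_self ..))
    have hrest : ∀ o ∈ rest, ∀ api ∈ o, PySem.Set.contains found api = pvHit fo api :=
      fun o hm => h o (List.mem_cons_of_mem _ hm)
    cases hp : ors.find? (pvHit fo) with
    | none => simp [pvCombLoop, pvSpecMatch, hfind, hp]
    | some api =>
      have hstep : pvCombLoop found (ors :: rest) acc = pvCombLoop found rest (acc ++ [api]) := by
        simp [pvCombLoop, hfind, hp]
      rw [hstep, ih (acc ++ [api]) hrest]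
      simp only [pvSpecMatch, hp]
      cases pvSpecMatch (pvHit fo) rest <;> simp

-- A's result loop: a conditional insert over fresh distinct keys appends its matches
lemma pv_items_condInsertFold (g : String × List (List String) → Option (List String)) :
    ∀ (l : List (String × List (List String))) (d : PySem.Dict String (List String)),
      (l.map Prod.fst).Nodup → (∀ p ∈ l, d.contains p.1 = false) →
      (l.foldl (fun d p =>
          match g p with
          | some c => d.insert p.1 c
          | none => d) d).items
        = d.items ++ l.filterMap (fun p => (g p).map (fun c => (p.1, c))) := by
  intro l
  induction l with
  | nil => intro d _ _; simp
  | cons p rest ih =>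
    intro d hnd hfresh
    have hnd' : (rest.map Prod.fst).Nodup := (List.nodup_cons.mp hnd).2
    have hp : d.contains p.1 = false := hfresh p (List.mem_cons_self ..)
    cases hg : g p with
    | none =>
      have := ih d hnd' (fun q hq => hfresh q (List.mem_cons_of_mem _ hq))
      simp [List.foldl, hg, this]
    | some c =>
      have hfresh' : ∀ q ∈ rest, (d.insert p.1 c).contains q.1 = false := by
        intro q hq
        have hne : q.1 ≠ p.1 := by
          intro he
          exact (List.nodup_cons.mp hnd).1 (he ▸ List.mem_map_of_mem hq)
        rw [PySem.Dict.contains_insert]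
        simp [hne, hfresh q (List.mem_cons_of_mem _ hq)]
      have := ih (d.insert p.1 c) hnd' hfresh'
      simp [List.foldl, hg, this, PySem.Dict.items_insert, hp]

-- B's result loop: same statement for an if-guarded insert over the enumerated list
lemma pv_items_condInsert (c : (String × List (List String)) × Nat → Bool)
    (v : (String × List (List String)) × Nat → List String) :
    ∀ (l : List ((String × List (List String)) × Nat)) (d : PySem.Dict String (List String)),
      (l.map (fun pi => pi.1.1)).Nodup → (∀ x ∈ l, d.contains x.1.1 = false) →
      (l.foldl (fun d pi => if c pi then d.insert pi.1.1 (v pi) else d) d).items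
        = d.items ++ l.filterMap (fun pi => if c pi then some (pi.1.1, v pi) else none) := by
  intro l
  induction l with
  | nil => intro d _ _; simp
  | cons p rest ih =>
    intro d hnd hfresh
    have hnd' : (rest.map (fun pi => pi.1.1)).Nodup := (List.nodup_cons.mp hnd).2
    have hp : d.contains p.1.1 = false := hfresh p (List.mem_cons_self ..)
    cases hg : c p with
    | false =>
      have := ih d hnd' (fun q hq => hfresh q (List.mem_cons_of_mem _ hq))
      simp [List.foldl, hg, this]
    | true =>
      have hfresh' : ∀ q ∈ rest, (d.insert p.1.1 (v p)).contains q.1.1 = false := by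
        intro q hq
        have hne : q.1.1 ≠ p.1.1 := by
          intro he
          apply (List.nodup_cons.mp hnd).1
          show p.1.1 ∈ rest.map (fun pi => pi.1.1)
          rw [← he]
          exact List.mem_map_of_mem hq
        rw [PySem.Dict.contains_insert]
        simp [hne, hfresh q (List.mem_cons_of_mem _ hq)]
      have := ih (d.insert p.1.1 (v p)) hnd' hfresh'
      simp [List.foldl, hg, this, PySem.Dict.items_insert, hp]

-- B side: the min-combining operation the best-slot fold performs on one slot
def pvComb : Option (Nat × String) → (Nat × String) → Option (Nat × String)
  | none, w => some w
  | some cur, w => if w.1 < cur.1 then some w else some cur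

def pvNMin : Option Nat → Nat → Option Nat
  | none, k => some k
  | some m, k => some (min m k)

-- the flattened (line, posting) stream B's double loop runs over
def pvAllPostsB (fo : String) (sa : List (String × List (List String))) : List (String × Nat × Nat × Nat) :=
  (pvLines fo).flatMap (fun line => ((pvIndexB sa).getD line []).map (fun u => (line, u)))

lemma pv_double_fold (lines : List String) (idx : String → List (Nat × Nat × Nat)) :
    ∀ b : PySem.Dict (Nat × Nat) (Nat × String),
      lines.foldl (fun b line => (idx line).foldl (pvBestStep line) b) b
        = (lines.flatMap (fun line => (idx line).map (fun u => (line, u)))).foldl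
            (fun b lt => pvBestStep lt.1 b lt.2) b := by
  induction lines with
  | nil => intro b; rfl
  | cons a t ih =>
    intro b
    simp only [List.foldl_cons, List.flatMap_cons, List.foldl_append, List.foldl_map, ih]

lemma pv_best_fold_get? (ps : List (String × Nat × Nat × Nat)) :
    ∀ (b : PySem.Dict (Nat × Nat) (Nat × String)) (q : Nat × Nat),
      (ps.foldl (fun b lt => pvBestStep lt.1 b lt.2) b).get? q
        = (ps.filter (fun lt => (lt.2.1, lt.2.2.1) == q)).foldl
            (fun o lt => pvComb o (lt.2.2.2, lt.1)) (b.get? q) := by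
  induction ps with
  | nil => intro b q; rfl
  | cons lt rest ih =>
    intro b q
    by_cases hk : (lt.2.1, lt.2.2.1) = q
    · have hstep : (pvBestStep lt.1 b lt.2).get? q = pvComb (b.get? q) (lt.2.2.2, lt.1) := by
        unfold pvBestStep
        rw [← hk]
        cases hb : b.get? (lt.2.1, lt.2.2.1) with
        | none => simp [pvComb, PySem.Dict.get?_insert_self]
        | some cur =>
          by_cases hlt : lt.2.2.2 < cur.1
          · simp [pvComb, hlt, PySem.Dict.get?_insert_self]
          · simp [pvComb, hlt, hb]
      have hfilt : ((lt :: rest).filter (fun lt => (lt.2.1, lt.2.2.1) == q))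
          = lt :: rest.filter (fun lt => (lt.2.1, lt.2.2.1) == q) := by
        simp [List.filter_cons, hk]
      rw [List.foldl_cons, ih, hstep, hfilt, List.foldl_cons]
    · have hstep : (pvBestStep lt.1 b lt.2).get? q = b.get? q := by
        unfold pvBestStep
        cases hb : b.get? (lt.2.1, lt.2.2.1) with
        | none =>
          show (b.insert (lt.2.1, lt.2.2.1) (lt.2.2.2, lt.1)).get? q = b.get? q
          exact PySem.Dict.get?_insert_of_ne _ _ (Ne.symm hk)
        | some cur =>
          show (if lt.2.2.2 < cur.1 then b.insert (lt.2.1, lt.2.2.1) (lt.2.2.2, lt.1) else b).get? q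
              = b.get? q
          by_cases hlt : lt.2.2.2 < cur.1
          · rw [if_pos hlt]
            exact PySem.Dict.get?_insert_of_ne _ _ (Ne.symm hk)
          · rw [if_neg hlt]
      have hfilt : ((lt :: rest).filter (fun lt => (lt.2.1, lt.2.2.1) == q))
          = rest.filter (fun lt => (lt.2.1, lt.2.2.1) == q) := by
        simp [List.filter_cons, hk]
      rw [List.foldl_cons, ih, hstep, hfilt]

lemma pvNMin_fold_some : ∀ (t : List Nat) (a : Nat), t.foldl pvNMin (some a) = some (t.foldl min a) := by
  intro t
  induction t with
  | nil => intro a; rfl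
  | cons k rest ih => intro a; simpa [pvNMin] using ih (min a k)

lemma pv_comb_min (f : Nat → String) :
    ∀ (vals : List (Nat × String)) (acc : Option Nat), (∀ w ∈ vals, w.2 = f w.1) →
      vals.foldl pvComb (acc.map (fun m => (m, f m)))
        = ((vals.map Prod.fst).foldl pvNMin acc).map (fun m => (m, f m)) := by
  intro vals
  induction vals with
  | nil => intro acc _; rfl
  | cons w rest ih =>
    intro acc h
    obtain ⟨k, b⟩ := w
    have hw : b = f k := h (k, b) (List.mem_cons_self ..)
    subst hw
    have hstep : pvComb (acc.map (fun m => (m, f m))) (k, f k)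
        = (pvNMin acc k).map (fun m => (m, f m)) := by
      cases acc with
      | none => rfl
      | some m =>
        show (if k < m then some (k, f k) else some (m, f m)) = some (min m k, f (min m k))
        by_cases hlt : k < m
        · rw [if_pos hlt, show min m k = k by omega]
        · rw [if_neg hlt, show min m k = m by omega]
    rw [List.foldl_cons, hstep, List.map_cons, List.foldl_cons]
    exact ih (pvNMin acc k) (fun u hu => h u (List.mem_cons_of_mem _ hu))

lemma pv_find?_of_min (P : String → Bool) :
    ∀ (ors : List String) (m : Nat) (a : String),
      ors[m]? = some a → P a = true → (∀ jj b, ors[jj]? = some b → P b = true → m ≤ jj) →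
      ors.find? P = some a := by
  intro ors
  induction ors with
  | nil => intro m a hm _ _; simp at hm
  | cons x t ih =>
    intro m a hm hPa hmin
    by_cases hx : P x = true
    · have hm0 : m ≤ 0 := hmin 0 x (by simp) hx
      have : m = 0 := by omega
      subst this
      simp only [List.getElem?_cons_zero, Option.some.injEq] at hm
      subst hm
      simp [List.find?, hx]
    · have hxf : P x = false := by
        cases hPx : P x
        · rfl
        · exact absurd hPx hx
      cases m with
      | zero =>
        simp only [List.getElem?_cons_zero, Option.some.injEq] at hm
        rw [hm] at hxf
        rw [hxf] at hPa
        cases hPa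
      | succ m' =>
        have hm' : t[m']? = some a := by simpa using hm
        have hmin' : ∀ jj b, t[jj]? = some b → P b = true → m' ≤ jj := by
          intro jj b hjj hb
          have := hmin (jj + 1) b (by simpa using hjj) hb
          omega
        simp only [List.find?, hxf]
        exact ih m' a hm' hPa hmin'

lemma pv_indexB_getD (sa : List (String × List (List String))) (line : String) :
    (pvIndexB sa).getD line [] = ((pvPostingsB sa).filter (fun pt => pt.1 == line)).map (·.2) := by
  unfold pvIndexB
  rw [PySem.Dict.getD_foldl_modify_append]
  simp

lemma pv_mem_postingsB (sa : List (String × List (List String))) (api : String) (i j k : Nat) :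
    (api, i, j, k) ∈ pvPostingsB sa ↔
      ∃ p, sa[i]? = some p ∧ ∃ ors, p.2[j]? = some ors ∧ ors[k]? = some api := by
  unfold pvPostingsB
  simp only [List.mem_flatMap, List.mem_map]
  constructor
  · rintro ⟨⟨p', i'⟩, hpi, ⟨ors', j'⟩, hoj, ⟨api', k'⟩, hak, heq⟩
    simp only [Prod.mk.injEq] at heq
    obtain ⟨rfl, rfl, rfl, rfl⟩ := heq
    exact ⟨p', (List.mem_zipIdx_iff_getElem?).mp hpi,
      ors', (List.mem_zipIdx_iff_getElem?).mp hoj, (List.mem_zipIdx_iff_getElem?).mp hak⟩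
  · rintro ⟨p, hp, ors, hors, hk⟩
    exact ⟨(p, i), (List.mem_zipIdx_iff_getElem?).mpr hp,
      (ors, j), (List.mem_zipIdx_iff_getElem?).mpr hors,
      (api, k), (List.mem_zipIdx_iff_getElem?).mpr hk, rfl⟩

lemma pv_mem_allPostsB (fo : String) (sa : List (String × List (List String))) (line : String)
    (t : Nat × Nat × Nat) :
    (line, t) ∈ pvAllPostsB fo sa ↔ line ∈ pvLines fo ∧ (line, t) ∈ pvPostingsB sa := by
  unfold pvAllPostsB
  constructor
  · intro hmem
    obtain ⟨line', hline', hx⟩ := List.mem_flatMap.mp hmem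
    obtain ⟨u, hu, heq⟩ := List.mem_map.mp hx
    simp only [Prod.mk.injEq] at heq
    obtain ⟨rfl, rfl⟩ := heq
    rw [pv_indexB_getD] at hu
    obtain ⟨pt, hpt, hpt2⟩ := List.mem_map.mp hu
    have hptm := List.mem_filter.mp hpt
    refine ⟨hline', ?_⟩
    have hpteq : pt = (line', u) := by
      have h1 : pt.1 = line' := by simpa using hptm.2
      have h2 : pt.2 = u := hpt2
      cases pt
      simp_all
    rw [← hpteq]
    exact hptm.1
  · rintro ⟨hline, hpost⟩
    refine List.mem_flatMap.mpr ⟨line, hline, List.mem_map.mpr ⟨t, ?_, rfl⟩⟩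
    rw [pv_indexB_getD]
    exact List.mem_map.mpr ⟨(line, t), List.mem_filter.mpr ⟨hpost, by simp⟩, rfl⟩

lemma pv_best_slot (fo : String) (sa : List (String × List (List String))) (i j : Nat)
    (p : String × List (List String)) (ors : List String)
    (hp : sa[i]? = some p) (hors : p.2[j]? = some ors) :
    ((pvBestB fo sa).get? (i, j)).map Prod.snd = ors.find? (pvHit fo) := by
  have hbest : pvBestB fo sa
      = (pvAllPostsB fo sa).foldl (fun b lt => pvBestStep lt.1 b lt.2) PySem.Dict.empty := by
    unfold pvBestB pvAllPostsB pvLines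
    exact pv_double_fold _ _ _
  rw [hbest, pv_best_fold_get?, PySem.Dict.get?_empty]
  rw [show (fun (o : Option (Nat × String)) (lt : String × Nat × Nat × Nat) => pvComb o (lt.2.2.2, lt.1))
      = (fun o lt => pvComb o ((fun lt : String × Nat × Nat × Nat => (lt.2.2.2, lt.1)) lt)) from rfl,
    ← List.foldl_map]
  set vals := (((pvAllPostsB fo sa).filter (fun lt => (lt.2.1, lt.2.2.1) == (i, j))).map
      (fun lt => (lt.2.2.2, lt.1))) with hvals
  have hmemv : ∀ w : Nat × String, w ∈ vals ↔ (w.2 ∈ pvLines fo ∧ ors[w.1]? = some w.2) := by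
    intro w
    rw [hvals]
    simp only [List.mem_map, List.mem_filter, beq_iff_eq]
    constructor
    · rintro ⟨⟨line, t1, t2, t3⟩, ⟨hmem, hkey⟩, hv⟩
      simp only [Prod.mk.injEq] at hkey hv
      obtain ⟨rfl, rfl⟩ := hkey
      obtain ⟨rfl, rfl⟩ := hv
      have hall := (pv_mem_allPostsB fo sa line (t1, t2, t3)).mp hmem
      obtain ⟨p', hp', ors', hors', hk'⟩ := (pv_mem_postingsB sa line t1 t2 t3).mp hall.2
      rw [hp] at hp'
      obtain rfl : p = p' := by injection hp'
      rw [hors] at hors'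
      obtain rfl : ors = ors' := by injection hors'
      exact ⟨hall.1, hk'⟩
    · rintro ⟨hline, hk⟩
      refine ⟨(w.2, i, j, w.1), ⟨?_, rfl⟩, by simp⟩
      exact (pv_mem_allPostsB fo sa w.2 (i, j, w.1)).mpr
        ⟨hline, (pv_mem_postingsB sa w.2 i j w.1).mpr ⟨p, hp, ors, hors, hk⟩⟩
  have hcoh : ∀ w ∈ vals, w.2 = (fun m => ors.getD m "") w.1 := by
    intro w hw
    have hmw := (hmemv w).mp hw
    show w.2 = ors.getD w.1 ""
    rw [List.getD_eq_getElem?_getD, hmw.2]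
    rfl
  have hcm := pv_comb_min (fun m => ors.getD m "") vals none hcoh
  simp only [Option.map_none] at hcm
  rw [hcm, Option.map_map]
  have hcomp : (Prod.snd ∘ fun m => (m, ors.getD m "")) = fun m => ors.getD m "" := rfl
  rw [hcomp]
  have hkmem : ∀ kk : Nat, kk ∈ vals.map Prod.fst ↔ ∃ a, ors[kk]? = some a ∧ a ∈ pvLines fo := by
    intro kk
    simp only [List.mem_map]
    constructor
    · rintro ⟨w, hw, rfl⟩
      have := (hmemv w).mp hw
      exact ⟨w.2, this.2, this.1⟩
    · rintro ⟨a, ha, hl⟩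
      exact ⟨(kk, a), (hmemv (kk, a)).mpr ⟨hl, ha⟩, rfl⟩
  cases hks : vals.map Prod.fst with
  | nil =>
    simp only [List.foldl_nil, Option.map_none]
    symm
    rw [List.find?_eq_none]
    intro a hmem hPa
    obtain ⟨kk, hkk⟩ := List.getElem?_of_mem hmem
    have hin : kk ∈ vals.map Prod.fst := (hkmem kk).mpr ⟨a, hkk, by simpa [pvHit] using hPa⟩
    rw [hks] at hin
    simp at hin
  | cons k t =>
    have hfold : (k :: t).foldl pvNMin none = some (t.foldl min k) := by
      rw [List.foldl_cons]
      exact pvNMin_fold_some t k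
    rw [hfold]
    set m := t.foldl min k with hm
    have hmmem : m ∈ vals.map Prod.fst := by
      rw [hks]
      rcases PySem.List.foldl_min_mem t k with h | h
      · rw [hm, h]
        exact List.mem_cons_self ..
      · exact List.mem_cons_of_mem _ (hm ▸ h)
    have hmle : ∀ x ∈ vals.map Prod.fst, m ≤ x := by
      intro x hx
      rw [hks] at hx
      rcases List.mem_cons.mp hx with rfl | hx'
      · exact (PySem.List.foldl_min_le t x).1
      · exact (PySem.List.foldl_min_le t k).2 x hx'
    obtain ⟨a, ha, hal⟩ := (hkmem m).mp hmmem
    have hPa : pvHit fo a = true := by simp [pvHit, hal]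
    have hmin : ∀ jj b, ors[jj]? = some b → pvHit fo b = true → m ≤ jj := by
      intro jj b hjj hb
      apply hmle
      refine (hkmem jj).mpr ⟨b, hjj, ?_⟩
      simpa [pvHit] using hb
    rw [pv_find?_of_min (pvHit fo) ors m a ha hPa hmin]
    simp [List.getD_eq_getElem?_getD, ha]

-- one entry of B's result loop equals the reference matcher
lemma pv_entry_eq (fo : String) (sa : List (String × List (List String))) (i : Nat)
    (p : String × List (List String)) (hp : sa[i]? = some p) :
    (if (List.range p.2.length).all (fun j => (pvBestB fo sa).contains (i, j))
     then some (p.1, (List.range p.2.length).map (fun j => ((pvBestB fo sa).getD (i, j) (0, "")).2))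
     else none)
    = (pvSpecMatch (pvHit fo) p.2).map (fun L => (p.1, L)) := by
  have hgetbang : ∀ (j : Nat), (hj : j < p.2.length) → p.2[j]! = p.2[j]'hj := by
    intro j hj
    rw [List.getElem!_eq_getElem?_getD, List.getElem?_eq_getElem hj]
    rfl
  have hslot : ∀ (j : Nat), j < p.2.length →
      ((pvBestB fo sa).get? (i, j)).map Prod.snd = (p.2[j]!).find? (pvHit fo) := by
    intro j hj
    have := pv_best_slot fo sa i j p (p.2[j]'hj) hp (by simp [hj])
    rw [hgetbang j hj]
    exact this
  cases hcond : (List.range p.2.length).all (fun j => (pvBestB fo sa).contains (i, j)) with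
  | true =>
    have hall : ∀ (j : Nat), j < p.2.length → ((p.2[j]!).find? (pvHit fo)).isSome = true := by
      intro j hj
      have hc := List.all_eq_true.mp hcond j (List.mem_range.mpr hj)
      rw [PySem.Dict.contains_eq_isSome_get?] at hc
      rw [← hslot j hj]
      simpa using hc
    have hall' : ∀ ors ∈ p.2, (ors.find? (pvHit fo)).isSome := by
      intro ors hors
      obtain ⟨j, hj, rfl⟩ := List.mem_iff_getElem.mp hors
      have := hall j hj
      rwa [hgetbang j hj] at this
    rw [pv_specMatch_some (pvHit fo) p.2 hall']
    simp only [Option.map_some, Option.some.injEq, if_true]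
    refine Prod.mk.injEq .. ▸ ⟨rfl, ?_⟩
    -- the per-clause values agree
    apply List.ext_getElem
    · simp
    · intro j hj1 hj2
      simp only [List.getElem_map, List.getElem_range]
      have hjlen : j < p.2.length := by simpa using hj1
      obtain ⟨a, hfa⟩ := Option.isSome_iff_exists.mp (hall j hjlen)
      have hsl := hslot j hjlen
      rw [hfa] at hsl
      cases hg : (pvBestB fo sa).get? (i, j) with
      | none => rw [hg] at hsl; simp at hsl
      | some w =>
        rw [hg] at hsl
        simp only [Option.map_some, Option.some.injEq] at hsl
        rw [PySem.Dict.getD_eq_get?_getD, hg]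
        simp only [Option.getD_some]
        rw [hsl]
        rw [← hgetbang j hjlen, hfa]
        rfl
  | false =>
    have hex : ∃ j, j < p.2.length ∧ ¬ ((pvBestB fo sa).contains (i, j) = true) := by
      by_contra hno
      push_neg at hno
      have : (List.range p.2.length).all (fun j => (pvBestB fo sa).contains (i, j)) = true := by
        rw [List.all_eq_true]
        intro j hjr
        exact hno j (List.mem_range.mp hjr)
      rw [this] at hcond
      cases hcond
    obtain ⟨j, hj, hnc⟩ := hex
    have hfn : (p.2[j]!).find? (pvHit fo) = none := by
      have hsl := hslot j hj
      rw [PySem.Dict.contains_eq_isSome_get?] at hnc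
      cases hg : (pvBestB fo sa).get? (i, j) with
      | none => rw [hg] at hsl; simpa using hsl.symm
      | some w => rw [hg] at hnc; simp at hnc
    have hmem : p.2[j]! ∈ p.2 := by
      rw [hgetbang j hj]
      exact List.getElem_mem hj
    rw [pv_specMatch_none (pvHit fo) p.2 (p.2[j]!) hmem hfn]
    simp

lemma pv_zipIdx_fst {α : Type} : ∀ (l : List α) (n : Nat), (l.zipIdx n).map Prod.fst = l := by
  intro l
  induction l with
  | nil => intro n; rfl
  | cons a t ih => intro n; simp [List.zipIdx_cons, ih]

-- ===== VERDICT (by name: the statement is the Claim_ definition above) =====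
theorem find_suspicious_combinations_spec : Claim_equal_find_suspicious_combinations := by
  intro fo sa _ hpre
  show find_suspicious_combinations fo sa = find_suspicious_combinations_alt fo sa
  have hA : find_suspicious_combinations fo sa =
      (sa.foldl (fun d p =>
        match (fun p : String × List (List String) => pvCombLoop (pvFound fo sa) p.2 []) p with
        | some c => d.insert p.1 c
        | none => d) PySem.Dict.empty).items := rfl
  have hB : find_suspicious_combinations_alt fo sa =
      (sa.zipIdx.foldl (fun d pi =>
        if (fun pi : (String × List (List String)) × Nat =>
              (List.range pi.1.2.length).all (fun j => (pvBestB fo sa).contains (pi.2, j))) pi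
        then d.insert pi.1.1
          ((fun pi : (String × List (List String)) × Nat =>
              (List.range pi.1.2.length).map (fun j => ((pvBestB fo sa).getD (pi.2, j) (0, "")).2)) pi)
        else d) PySem.Dict.empty).items := rfl
  rw [hA, hB,
    pv_items_condInsertFold (fun p => pvCombLoop (pvFound fo sa) p.2 []) sa PySem.Dict.empty hpre
      (by intro q _; simp),
    pv_items_condInsert _ _ sa.zipIdx PySem.Dict.empty
      (by
        have : sa.zipIdx.map (fun pi => pi.1.1) = sa.map Prod.fst := by
          rw [show (fun pi : (String × List (List String)) × Nat => pi.1.1)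
              = (Prod.fst ∘ Prod.fst) from rfl, ← List.map_map, pv_zipIdx_fst]
        rw [this]
        exact hpre)
      (by intro q _; simp)]
  rw [show (PySem.Dict.empty : PySem.Dict String (List String)).items
      = ([] : List (String × List String)) from rfl]
  simp only [List.nil_append]
  -- both sides equal the filterMap of the reference matcher over sa
  have hAside : sa.filterMap
        (fun p => ((fun p : String × List (List String) => pvCombLoop (pvFound fo sa) p.2 []) p).map
          (fun c => (p.1, c)))
      = sa.filterMap (fun p => (pvSpecMatch (pvHit fo) p.2).map (fun L => (p.1, L))) := by
    apply List.filterMap_congr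
    intro p hp
    have hcontains : ∀ ors ∈ p.2, ∀ api ∈ ors,
        PySem.Set.contains (pvFound fo sa) api = pvHit fo api := by
      intro ors hors api hapi
      have hinS : api ∈ pvS sa := by
        unfold pvS
        rw [pv_mem_singleFold]
        exact Or.inr ⟨p, hp, ors, hors, hapi⟩
      rw [Bool.eq_iff_iff, PySem.Set.contains_iff]
      unfold pvFound
      rw [pv_mem_foundFold]
      unfold pvHit
      constructor
      · rintro (h | h)
        · exact absurd h (by simp [PySem.Set.empty])
        · simpa using h.1
      · intro h
        exact Or.inr ⟨by simpa using h, hinS⟩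
    have hcl := pv_combLoop_eq fo (pvFound fo sa) p.2 [] hcontains
    simp only [hcl]
    cases pvSpecMatch (pvHit fo) p.2 <;> simp
  have hBside : sa.zipIdx.filterMap
        (fun pi => if (fun pi : (String × List (List String)) × Nat =>
              (List.range pi.1.2.length).all (fun j => (pvBestB fo sa).contains (pi.2, j))) pi
          then some (pi.1.1,
            (fun pi : (String × List (List String)) × Nat =>
              (List.range pi.1.2.length).map (fun j => ((pvBestB fo sa).getD (pi.2, j) (0, "")).2)) pi)
          else none)
      = sa.filterMap (fun p => (pvSpecMatch (pvHit fo) p.2).map (fun L => (p.1, L))) := by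
    have hstep : sa.zipIdx.filterMap
          (fun pi => if (List.range pi.1.2.length).all (fun j => (pvBestB fo sa).contains (pi.2, j))
            then some (pi.1.1,
              (List.range pi.1.2.length).map (fun j => ((pvBestB fo sa).getD (pi.2, j) (0, "")).2))
            else none)
        = sa.zipIdx.filterMap (fun pi => (pvSpecMatch (pvHit fo) pi.1.2).map (fun L => (pi.1.1, L))) := by
      apply List.filterMap_congr
      intro pi hpi
      have hp : sa[pi.2]? = some pi.1 := by
        have h := hpi
        rw [← Prod.mk.eta (p := pi)] at h
        exact (List.mem_zipIdx_iff_getElem?).mp h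
      exact pv_entry_eq fo sa pi.2 pi.1 hp
    rw [hstep]
    conv_rhs => rw [← pv_zipIdx_fst sa 0]
    rw [List.filterMap_map]
    rfl
  rw [hAside, hBside]
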